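-- pv_equiv track=rewrite | github.com/lumorphnetwork/code | utils/routing.py | find_path_in_list
-- ===== SOURCE A (Python) =====
-- def find_path_in_list(wavelength, path, picked_paths):
--     for picked_path in picked_paths:
--         w, nodes_in_picked_path = picked_path
--         if w == wavelength:
--             for node in path:
--                 if node in nodes_in_picked_path:
--                     return True
--     return False
-- ===== SOURCE B (Python) =====
-- def find_path_in_list(wavelength, path, picked_paths):
--     collected = set()
--     for w, nodes_in_picked_path in picked_paths:
--         if w == wavelength:
--             collected.update(nodes_in_picked_path)
--     return any(node in collected for node in path)
-- ===== Notes on version B (the rewrite author's own statement) =====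
-- stated objective: simpler
-- what changed: Replaced the nested per-picked-path scan of path with a single aggregation pass that collects all nodes of wavelength-matching paths into one set, followed by one membership query per path node.
import Mathlib
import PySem

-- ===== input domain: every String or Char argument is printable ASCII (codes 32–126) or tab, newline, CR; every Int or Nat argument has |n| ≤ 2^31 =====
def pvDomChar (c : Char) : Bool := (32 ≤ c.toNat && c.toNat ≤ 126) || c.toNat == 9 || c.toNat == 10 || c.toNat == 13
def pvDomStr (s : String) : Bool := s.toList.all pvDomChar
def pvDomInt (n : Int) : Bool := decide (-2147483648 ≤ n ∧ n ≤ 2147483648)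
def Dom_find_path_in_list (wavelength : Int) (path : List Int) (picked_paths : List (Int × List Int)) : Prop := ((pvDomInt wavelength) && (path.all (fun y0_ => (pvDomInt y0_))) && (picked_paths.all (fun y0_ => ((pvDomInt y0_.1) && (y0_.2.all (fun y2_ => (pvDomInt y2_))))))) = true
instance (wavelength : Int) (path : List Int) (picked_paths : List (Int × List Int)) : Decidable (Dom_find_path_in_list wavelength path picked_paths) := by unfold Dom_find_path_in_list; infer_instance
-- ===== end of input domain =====

-- B replaces A's nested scan of `path` inside the loop over picked_paths by one aggregation
-- pass collecting all nodes of wavelength-matching paths into a set, then a single query pass (objective: simpler).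

-- ===== PORT A =====
-- Literal port of A: loop over picked_paths; on a wavelength match, scan path for a node
-- contained in that picked path's node list, returning True at the first hit.
def find_path_in_list (wavelength : Int) (path : List Int) (picked_paths : List (Int × List Int)) : Bool :=
  match picked_paths with
  | [] => false
  | picked_path :: rest =>
    if picked_path.1 == wavelength then
      if path.any (fun node => picked_path.2.contains node) then true
      else find_path_in_list wavelength path rest
    else find_path_in_list wavelength path rest

-- ===== PORT B =====
-- Literal port of B: build `collected` = set of all nodes of matching picked paths, then query.
def find_path_in_list_alt (wavelength : Int) (path : List Int) (picked_paths : List (Int × List Int)) : Bool :=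
  let collected : PySem.Set Int :=
    picked_paths.foldl
      (fun acc p => if p.1 == wavelength then PySem.Set.update acc p.2 else acc)
      PySem.Set.empty
  path.any (fun node => PySem.Set.contains collected node)

-- ===== PRECONDITION & SPEC =====
def Spec_find_path_in_list (wavelength : Int) (path : List Int) (picked_paths : List (Int × List Int)) (out : Bool) : Prop := out = find_path_in_list_alt wavelength path picked_paths
instance (wavelength : Int) (path : List Int) (picked_paths : List (Int × List Int)) (out : Bool) : Decidable (Spec_find_path_in_list wavelength path picked_paths out) := by unfold Spec_find_path_in_list; infer_instance

-- ===== CLAIM (what is proved, stated in full; the proofs are below) =====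
def Claim_equal_find_path_in_list : Prop := ∀ (wavelength : Int) (path : List Int) (picked_paths : List (Int × List Int)), Dom_find_path_in_list wavelength path picked_paths → Spec_find_path_in_list wavelength path picked_paths (find_path_in_list wavelength path picked_paths)

-- ===== LEMMAS AND PROOFS =====

-- membership in the collected set: accumulator-generalised invariant of B's first pass
lemma mem_collected (wavelength x : Int) (l : List (Int × List Int)) (acc : PySem.Set Int) :
    x ∈ l.foldl (fun acc p => if p.1 == wavelength then PySem.Set.update acc p.2 else acc) acc
    ↔ x ∈ acc ∨ ∃ p ∈ l, p.1 = wavelength ∧ x ∈ p.2 := by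
  induction l generalizing acc with
  | nil => simp
  | cons hd tl ih =>
    rw [List.foldl_cons, ih]
    by_cases h : hd.1 = wavelength
    · simp only [h, beq_self_eq_true, if_true, PySem.Set.mem_update]
      constructor
      · rintro ((hx | hx) | ⟨p, hp, hw, hn⟩)
        · exact Or.inl hx
        · exact Or.inr ⟨hd, List.mem_cons_self .., h, hx⟩
        · exact Or.inr ⟨p, List.mem_cons_of_mem _ hp, hw, hn⟩
      · rintro (hx | ⟨p, hp, hw, hn⟩)
        · exact Or.inl (Or.inl hx)
        · rcases List.mem_cons.mp hp with rfl | hp'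
          · exact Or.inl (Or.inr hn)
          · exact Or.inr ⟨p, hp', hw, hn⟩
    · have hb : (hd.1 == wavelength) = false := by simpa using h
      rw [hb]
      simp only [Bool.false_eq_true, if_false]
      constructor
      · rintro (hx | ⟨p, hp, hw, hn⟩)
        · exact Or.inl hx
        · exact Or.inr ⟨p, List.mem_cons_of_mem _ hp, hw, hn⟩
      · rintro (hx | ⟨p, hp, hw, hn⟩)
        · exact Or.inl hx
        · rcases List.mem_cons.mp hp with rfl | hp'
          · exact absurd hw h
          · exact Or.inr ⟨p, hp', hw, hn⟩

-- characterisation of A's result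
lemma A_eq_any (wavelength : Int) (path : List Int) (l : List (Int × List Int)) :
    find_path_in_list wavelength path l
    = l.any (fun p => p.1 == wavelength && path.any (fun node => p.2.contains node)) := by
  induction l with
  | nil => rfl
  | cons hd tl ih =>
    simp only [find_path_in_list, List.any_cons, ih]
    by_cases h : (hd.1 == wavelength) = true
    · simp only [h, if_true]
      by_cases hn : (path.any (fun node => hd.2.contains node)) = true
      · rw [if_pos hn]
        simp
        exact Or.inl (by simpa [List.any_eq_true] using hn)
      · rw [if_neg hn]
        simp
        exact fun x hx hmem =>
          absurd (List.any_eq_true.mpr ⟨x, hx, by simpa using hmem⟩) hn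
    · simp [h]

lemma A_true_iff (wavelength : Int) (path : List Int) (l : List (Int × List Int)) :
    find_path_in_list wavelength path l = true
    ↔ ∃ p ∈ l, p.1 = wavelength ∧ ∃ n ∈ path, n ∈ p.2 := by
  simp [A_eq_any, List.any_eq_true]

-- characterisation of B's result
lemma B_true_iff (wavelength : Int) (path : List Int) (l : List (Int × List Int)) :
    find_path_in_list_alt wavelength path l = true
    ↔ ∃ n ∈ path, ∃ p ∈ l, p.1 = wavelength ∧ n ∈ p.2 := by
  simp only [find_path_in_list_alt, List.any_eq_true, PySem.Set.contains_iff,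
    mem_collected]
  simp [PySem.Set.empty]

-- ===== VERDICT (by name: the statement is the Claim_ definition above) =====
theorem find_path_in_list_spec : Claim_equal_find_path_in_list := by
  intro wavelength path picked_paths _
  unfold Spec_find_path_in_list
  rw [← Bool.coe_iff_coe, A_true_iff, B_true_iff]
  tauto
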